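-- pv_equiv track=rewrite | github.com/DeniseRings3/TA-PESP | scripts/visualisations/visualisations.py | find_next_track_of_type
-- ===== SOURCE A (Python) =====
-- def find_next_track_of_type(array, element,typ,dir):
--     start = [i for i,(x,y) in enumerate(array) if x  == element ][0]
--     if dir == 1:
--         for count,(next_track,val) in enumerate(array[start+dir:]):
--             if typ == next_track[next_track.rfind('_') + 1:]:
--
--                 return val
--     if dir == -1:
--         for count,(track,val) in enumerate(reversed(array[:start])):
--             if typ == track[track.rfind('_') + 1:]:
--                 return val
-- ===== SOURCE B (Python) =====
-- def find_next_track_of_type(array, element, typ, dir):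
--     start = [i for i, (x, y) in enumerate(array) if x == element][0]
--     if dir not in (1, -1):
--         return None
--     matches = [(i, v) for i, (t, v) in enumerate(array)
--                if typ == t[t.rfind('_') + 1:]]
--     if dir == 1:
--         after = [v for i, v in matches if i > start]
--         return after[0] if after else None
--     before = [v for i, v in matches if i < start]
--     return before[-1] if before else None
-- ===== Notes on version B (the rewrite author's own statement) =====
-- stated objective: alternative
-- what changed: B builds in one pass the list of (index, value) pairs of ALL tracks whose type matches typ, then answers by selection on that index structure (first match with index > start for dir=1, last match with index < start for dir=-1), instead of A's direction-specific slice-and-scan from the start position.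
import Mathlib
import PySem

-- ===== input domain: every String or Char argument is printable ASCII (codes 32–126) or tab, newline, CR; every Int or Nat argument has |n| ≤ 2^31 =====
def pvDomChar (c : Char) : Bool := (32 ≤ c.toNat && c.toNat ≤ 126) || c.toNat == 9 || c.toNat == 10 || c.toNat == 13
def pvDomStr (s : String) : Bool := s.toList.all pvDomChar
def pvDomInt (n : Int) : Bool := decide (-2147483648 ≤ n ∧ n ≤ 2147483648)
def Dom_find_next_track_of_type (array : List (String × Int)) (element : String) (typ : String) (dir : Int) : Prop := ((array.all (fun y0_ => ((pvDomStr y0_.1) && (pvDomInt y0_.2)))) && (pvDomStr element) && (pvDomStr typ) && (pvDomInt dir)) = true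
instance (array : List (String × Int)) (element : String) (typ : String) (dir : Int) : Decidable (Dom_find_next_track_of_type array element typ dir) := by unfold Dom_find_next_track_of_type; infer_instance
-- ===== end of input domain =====

-- B builds the list of all (index, value) pairs whose track type matches typ in one pass, then
-- selects first-after / last-before the start index, instead of A's directional slice scan
-- (objective: alternative decomposition, same cost).

-- ===== PORT A =====
-- typ == track[track.rfind('_') + 1:]  (the type test, textually the same in both Pythons)
def pvTrackType (track : String) : String :=
  PySem.Str.slice track (some (PySem.Str.rfind track "_" + 1)) none

-- [i for i,(x,y) in enumerate(array) if x == element][0]  (none = IndexError, excluded by Pre_)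
def pvFirstIdx? (array : List (String × Int)) (element : String) : Option Nat :=
  match array with
  | [] => none
  | (x, _) :: rest =>
      if x = element then some 0 else (pvFirstIdx? rest element).map (· + 1)

-- the for-loop body of either branch of A: first matching track's value in the given order
def pvScanA (l : List (String × Int)) (typ : String) : Option Int :=
  match l with
  | [] => none
  | (t, v) :: rest => if typ = pvTrackType t then some v else pvScanA rest typ

def find_next_track_of_type (array : List (String × Int)) (element : String) (typ : String) (dir : Int) : Option Int :=
  match pvFirstIdx? array element with
  | none => none   -- Python raises IndexError here; excluded by Pre_
  | some start =>
      if dir = 1 then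
        pvScanA (PySem.List.slice array (some ((start : Int) + dir)) none) typ
      else if dir = -1 then
        pvScanA (PySem.List.slice array none (some (start : Int))).reverse typ
      else none

-- ===== PORT B =====
-- matches = [(i, v) for i,(t,v) in enumerate(array) if typ == t[t.rfind('_')+1:]]
-- (the enumerate counter is carried as k)
def pvMatchesFrom (array : List (String × Int)) (typ : String) (k : Nat) : List (Nat × Int) :=
  match array with
  | [] => []
  | (t, v) :: rest =>
      if typ = pvTrackType t then (k, v) :: pvMatchesFrom rest typ (k + 1)
      else pvMatchesFrom rest typ (k + 1)

def find_next_track_of_type_alt (array : List (String × Int)) (element : String) (typ : String) (dir : Int) : Option Int :=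
  match pvFirstIdx? array element with
  | none => none   -- Python raises IndexError here; excluded by Pre_
  | some start =>
      if dir = 1 ∨ dir = -1 then
        let ms := pvMatchesFrom array typ 0
        if dir = 1 then
          -- after = [v for i, v in matches if i > start]; after[0] if after else None
          (((ms.filter (fun p => start < p.1)).map Prod.snd).head?)
        else
          -- before = [v for i, v in matches if i < start]; before[-1] if before else None
          (((ms.filter (fun p => p.1 < start)).map Prod.snd).getLast?)
      else none

-- ===== PRECONDITION & SPEC =====
-- Pre_ excludes exactly the inputs whose element does not occur as a first component:
-- there A raises IndexError (and B too).
def Pre_find_next_track_of_type (array : List (String × Int)) (element : String) (typ : String) (dir : Int) : Prop :=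
  element ∈ array.map Prod.fst
instance (array : List (String × Int)) (element : String) (typ : String) (dir : Int) : Decidable (Pre_find_next_track_of_type array element typ dir) := by unfold Pre_find_next_track_of_type; infer_instance

def pvWitness_find_next_track_of_type : (List (String × Int)) × String × String × Int :=
  ([("a_x", 1), ("b_y", 2)], "a_x", "y", 1)

def Spec_find_next_track_of_type (array : List (String × Int)) (element : String) (typ : String) (dir : Int) (out : Option Int) : Prop := out = find_next_track_of_type_alt array element typ dir
instance (array : List (String × Int)) (element : String) (typ : String) (dir : Int) (out : Option Int) : Decidable (Spec_find_next_track_of_type array element typ dir out) := by unfold Spec_find_next_track_of_type; infer_instance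

-- ===== CLAIM =====
def Claim_equal_find_next_track_of_type : Prop := ∀ (array : List (String × Int)) (element : String) (typ : String) (dir : Int), Dom_find_next_track_of_type array element typ dir → Pre_find_next_track_of_type array element typ dir → Spec_find_next_track_of_type array element typ dir (find_next_track_of_type array element typ dir)

-- ===== LEMMAS AND PROOFS =====

theorem pvFirstIdx?_isSome {array : List (String × Int)} {element : String}
    (h : element ∈ array.map Prod.fst) : ∃ s, pvFirstIdx? array element = some s := by
  induction array with
  | nil => simp at h
  | cons p rest ih =>
      obtain ⟨x, v⟩ := p
      by_cases hx : x = element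
      · exact ⟨0, by simp [pvFirstIdx?, hx]⟩
      · simp only [List.map_cons, List.mem_cons] at h
        rcases h with h | h
        · exact absurd h.symm hx
        · obtain ⟨s, hs⟩ := ih h
          exact ⟨s + 1, by simp [pvFirstIdx?, hx, hs]⟩

theorem pvFirstIdx?_lt {array : List (String × Int)} {element : String} {s : Nat}
    (h : pvFirstIdx? array element = some s) : s < array.length := by
  induction array generalizing s with
  | nil => simp [pvFirstIdx?] at h
  | cons p rest ih =>
      obtain ⟨x, v⟩ := p
      by_cases hx : x = element
      · simp only [pvFirstIdx?, hx, if_pos, Option.some.injEq] at h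
        simp [← h]
      · simp only [pvFirstIdx?, hx, if_false, Option.map_eq_some_iff] at h
        obtain ⟨t, ht, rfl⟩ := h
        have := ih ht
        simpa using Nat.succ_lt_succ this

theorem pvMatchesFrom_append (typ : String) :
    ∀ (l1 l2 : List (String × Int)) (k : Nat),
      pvMatchesFrom (l1 ++ l2) typ k
        = pvMatchesFrom l1 typ k ++ pvMatchesFrom l2 typ (k + l1.length) := by
  intro l1
  induction l1 with
  | nil => intro l2 k; simp [pvMatchesFrom]
  | cons p rest ih =>
      intro l2 k
      obtain ⟨t, v⟩ := p
      have hsh : k + (rest.length + 1) = k + 1 + rest.length := by omega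
      simp only [List.cons_append, pvMatchesFrom, List.length_cons, hsh]
      by_cases hm : typ = pvTrackType t
      · rw [if_pos hm, if_pos hm, ih, List.cons_append]
      · rw [if_neg hm, if_neg hm, ih]

theorem pvMatchesFrom_bound (typ : String) :
    ∀ (l : List (String × Int)) (k : Nat) (p : Nat × Int),
      p ∈ pvMatchesFrom l typ k → k ≤ p.1 ∧ p.1 < k + l.length := by
  intro l
  induction l with
  | nil => intro k p hp; simp [pvMatchesFrom] at hp
  | cons q rest ih =>
      intro k p hp
      obtain ⟨t, v⟩ := q
      simp only [pvMatchesFrom, List.length_cons] at hp ⊢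
      by_cases hm : typ = pvTrackType t
      · rw [if_pos hm] at hp
        rcases List.mem_cons.mp hp with rfl | hp
        · simp
        · have := ih (k + 1) p hp; omega
      · rw [if_neg hm] at hp
        have := ih (k + 1) p hp; omega

theorem pvMatchesFrom_head (typ : String) :
    ∀ (l : List (String × Int)) (k : Nat),
      ((pvMatchesFrom l typ k).map Prod.snd).head? = pvScanA l typ := by
  intro l
  induction l with
  | nil => intro k; simp [pvMatchesFrom, pvScanA]
  | cons p rest ih =>
      intro k
      obtain ⟨t, v⟩ := p
      by_cases hm : typ = pvTrackType t <;> simp [pvMatchesFrom, pvScanA, hm, ih]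

theorem pvMatchesFrom_last (typ : String) :
    ∀ (l : List (String × Int)) (k : Nat),
      ((pvMatchesFrom l typ k).map Prod.snd).getLast? = pvScanA l.reverse typ := by
  intro l
  induction l using List.reverseRecOn with
  | nil => intro k; simp [pvMatchesFrom, pvScanA]
  | append_singleton rest p ih =>
      intro k
      obtain ⟨t, v⟩ := p
      rw [pvMatchesFrom_append, List.reverse_append]
      by_cases hm : typ = pvTrackType t
      · simp [pvMatchesFrom, pvScanA, hm]
      · simp [pvMatchesFrom, pvScanA, hm, ih]

-- ===== VERDICT =====
theorem find_next_track_of_type_spec : Claim_equal_find_next_track_of_type := by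
  intro array element typ dir _hdom hpre
  unfold Spec_find_next_track_of_type
  obtain ⟨s, hs⟩ := pvFirstIdx?_isSome hpre
  have hslt : s < array.length := pvFirstIdx?_lt hs
  unfold find_next_track_of_type find_next_track_of_type_alt
  simp only [hs]
  by_cases h1 : dir = 1
  · subst h1
    have hcast : (s : Int) + 1 = ((s + 1 : Nat) : Int) := by push_cast; ring
    rw [hcast, PySem.List.slice_from_natCast]
    have hsplit : pvMatchesFrom array typ 0
        = pvMatchesFrom (array.take (s + 1)) typ 0
          ++ pvMatchesFrom (array.drop (s + 1)) typ (0 + (array.take (s + 1)).length) := by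
      conv_lhs => rw [← List.take_append_drop (s + 1) array]
      exact pvMatchesFrom_append typ _ _ 0
    have hlen : (array.take (s + 1)).length = s + 1 := by
      simp [List.length_take]; omega
    have hf1 : (pvMatchesFrom (array.take (s + 1)) typ 0).filter (fun p => s < p.1) = [] := by
      refine List.filter_eq_nil_iff.mpr ?_
      intro p hp
      have := pvMatchesFrom_bound typ _ _ _ hp
      rw [hlen] at this
      simp; omega
    have hf2 : (pvMatchesFrom (array.drop (s + 1)) typ (0 + (array.take (s + 1)).length)).filter
        (fun p => s < p.1) = pvMatchesFrom (array.drop (s + 1)) typ (0 + (array.take (s + 1)).length) := by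
      refine List.filter_eq_self.mpr ?_
      intro p hp
      have := pvMatchesFrom_bound typ _ _ _ hp
      rw [hlen] at this
      simp; omega
    rw [hsplit, List.filter_append, hf1, hf2, List.nil_append, pvMatchesFrom_head]
    simp
  · by_cases h2 : dir = -1
    · subst h2
      have hne : ¬ ((-1 : Int) = 1) := by decide
      rw [if_neg hne, if_pos (by decide : (-1 : Int) = -1),
          if_pos (Or.inr (by decide : (-1 : Int) = -1)), if_neg hne]
      rw [PySem.List.slice_to_natCast]
      have hsplit : pvMatchesFrom array typ 0
          = pvMatchesFrom (array.take s) typ 0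
            ++ pvMatchesFrom (array.drop s) typ (0 + (array.take s).length) := by
        conv_lhs => rw [← List.take_append_drop s array]
        exact pvMatchesFrom_append typ _ _ 0
      have hlen : (array.take s).length = s := by
        simp [List.length_take]; omega
      have hf1 : (pvMatchesFrom (array.take s) typ 0).filter (fun p => p.1 < s)
          = pvMatchesFrom (array.take s) typ 0 := by
        refine List.filter_eq_self.mpr ?_
        intro p hp
        have := pvMatchesFrom_bound typ _ _ _ hp
        rw [hlen] at this
        simp; omega
      have hf2 : (pvMatchesFrom (array.drop s) typ (0 + (array.take s).length)).filter
          (fun p => p.1 < s) = [] := by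
        refine List.filter_eq_nil_iff.mpr ?_
        intro p hp
        have := pvMatchesFrom_bound typ _ _ _ hp
        rw [hlen] at this
        simp; omega
      rw [hsplit, List.filter_append, hf1, hf2, List.append_nil, pvMatchesFrom_last]
    · simp [h1, h2]
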